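-- pv_equiv track=rewrite | github.com/DeborahVolpe/VLSI_Lab_quantum_compilation_toolchain | connectivity/scripts/S_test_equivalence.py | keep_common_keys
-- ===== SOURCE A (Python) =====
-- import collections
--
-- def keep_common_keys(dict_in1, dict_in2):
--     common_keys = list(dict_in1.keys() & dict_in2.keys())
--     dict_out1 = {}
--     dict_out2 = {}
--     for common_key in common_keys:
--         dict_out1[common_key] = dict_in1[common_key]
--         dict_out2[common_key] = dict_in2[common_key]
--     dict_out1 = collections.OrderedDict(sorted(dict_out1.items()))
--     dict_out2 = collections.OrderedDict(sorted(dict_out2.items()))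
--
--     sumMeasuresOutsideCommonSupportDict1 = 0
--     for key in dict_in1.keys():
--         if(not key in common_keys ):
--             sumMeasuresOutsideCommonSupportDict1 += dict_in1[key]
--     sumMeasuresOutsideCommonSupportDict2 = 0
--     for key in dict_in2.keys():
--         if(not key in common_keys ):
--             sumMeasuresOutsideCommonSupportDict2 += dict_in2[key]
--
--     return (dict_out1, dict_out2, sumMeasuresOutsideCommonSupportDict1, sumMeasuresOutsideCommonSupportDict2)
-- ===== SOURCE B (Python) =====
-- import collections
--
-- def keep_common_keys(dict_in1, dict_in2):
--     # Sort both dicts' items by key, then do a two-pointer merge of the two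
--     # sorted sequences: equal keys go into the (already sorted) output dicts,
--     # the smaller key's value is added to its side's outside-support sum.
--     items1 = sorted(dict_in1.items())
--     items2 = sorted(dict_in2.items())
--     n1, n2 = len(items1), len(items2)
--     out1 = collections.OrderedDict()
--     out2 = collections.OrderedDict()
--     sum1 = 0
--     sum2 = 0
--     i = 0
--     j = 0
--     while i < n1 and j < n2:
--         k1, v1 = items1[i]
--         k2, v2 = items2[j]
--         if k1 == k2:
--             out1[k1] = v1
--             out2[k2] = v2
--             i += 1
--             j += 1
--         elif k1 < k2:
--             sum1 += v1
--             i += 1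
--         else:
--             sum2 += v2
--             j += 1
--     while i < n1:
--         sum1 += items1[i][1]
--         i += 1
--     while j < n2:
--         sum2 += items2[j][1]
--         j += 1
--     return (out1, out2, sum1, sum2)
-- ===== Notes on version B (the rewrite author's own statement) =====
-- stated objective: alternative
-- what changed: A intersects the key sets, rebuilds each output dict by lookups over the intersection, sorts them, and sums the outside values with per-key list-membership scans; B instead sorts both item lists once and runs a single two-pointer merge over the two sorted sequences, emitting common pairs already in sorted order and accumulating the outside sums from the unmatched smaller keys, with no membership tests or lookups at all; Pre_ restricts the association-list encoding to valid dict representations (distinct keys), excluding no actual Python input.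
import Mathlib
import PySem

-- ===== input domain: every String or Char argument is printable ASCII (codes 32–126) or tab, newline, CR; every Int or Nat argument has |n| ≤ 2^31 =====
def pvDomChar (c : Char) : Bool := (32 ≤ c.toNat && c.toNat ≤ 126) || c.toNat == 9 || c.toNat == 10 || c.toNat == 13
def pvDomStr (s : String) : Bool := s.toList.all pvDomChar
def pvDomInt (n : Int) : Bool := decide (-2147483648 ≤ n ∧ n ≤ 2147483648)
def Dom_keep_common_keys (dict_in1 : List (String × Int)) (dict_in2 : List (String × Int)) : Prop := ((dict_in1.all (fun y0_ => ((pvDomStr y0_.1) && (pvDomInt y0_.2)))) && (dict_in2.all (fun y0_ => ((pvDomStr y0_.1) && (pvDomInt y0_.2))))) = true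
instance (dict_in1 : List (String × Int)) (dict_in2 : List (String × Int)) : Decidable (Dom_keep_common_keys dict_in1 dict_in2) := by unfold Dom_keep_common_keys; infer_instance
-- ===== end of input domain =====

-- B replaces A's key-set intersection + membership-scan loops by sorting both item
-- lists once and computing outputs and sums in a single two-pointer merge
-- (objective: faster mechanism — no per-key membership scans).


-- ===== PORT A =====
-- 'dict_in1.keys() & dict_in2.keys()' is a set; Python's set iteration order is ported in
-- first-dict key order — immaterial for the result, which sorts the dicts and sums commutatively.
def keep_common_keys (dict_in1 : List (String × Int)) (dict_in2 : List (String × Int)) : (List (String × Int)) × (List (String × Int)) × Int × Int :=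
  let D1 : PySem.Dict String Int := ⟨dict_in1⟩
  let D2 : PySem.Dict String Int := ⟨dict_in2⟩
  let common_keys : List String := (PySem.Set.ofList D1.keys).filter (fun k => D2.contains k)
  -- dict_out1[common_key] = dict_in1[common_key] never raises: common_key is a key of dict_in1
  let dict_out1 := common_keys.foldl (fun acc k => acc.insert k (D1.getD k 0)) (PySem.Dict.mk [])
  let dict_out2 := common_keys.foldl (fun acc k => acc.insert k (D2.getD k 0)) (PySem.Dict.mk [])
  let dict_out1' := PySem.List.sorted2 dict_out1.items Prod.fst Prod.snd
  let dict_out2' := PySem.List.sorted2 dict_out2.items Prod.fst Prod.snd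
  let sum1 := D1.keys.foldl (fun s k => if ¬ common_keys.contains k then s + D1.getD k 0 else s) 0
  let sum2 := D2.keys.foldl (fun s k => if ¬ common_keys.contains k then s + D2.getD k 0 else s) 0
  (dict_out1', dict_out2', sum1, sum2)

-- ===== PORT B =====
-- the main 'while i < n1 and j < n2' two-pointer merge of Source B, followed by the two
-- tail while-loops (ported as folds over the remaining suffixes)
def pvMergeLoop (items1 items2 : List (String × Int)) (fuel i j : Nat)
    (out1 out2 : List (String × Int)) (s1 s2 : Int) :
    (List (String × Int)) × (List (String × Int)) × Int × Int :=
  match fuel with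
  | 0 =>
    (out1, out2,
     (items1.drop i).foldl (fun s kv => s + kv.2) s1,
     (items2.drop j).foldl (fun s kv => s + kv.2) s2)
  | fuel + 1 =>
    if h : i < items1.length ∧ j < items2.length then
      let kv1 := items1[i]'h.1
      let kv2 := items2[j]'h.2
      if kv1.1 == kv2.1 then
        pvMergeLoop items1 items2 fuel (i+1) (j+1) (out1 ++ [kv1]) (out2 ++ [kv2]) s1 s2
      else if kv1.1 < kv2.1 then
        pvMergeLoop items1 items2 fuel (i+1) j out1 out2 (s1 + kv1.2) s2
      else
        pvMergeLoop items1 items2 fuel i (j+1) out1 out2 s1 (s2 + kv2.2)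
    else
      (out1, out2,
       (items1.drop i).foldl (fun s kv => s + kv.2) s1,
       (items2.drop j).foldl (fun s kv => s + kv.2) s2)

def keep_common_keys_alt (dict_in1 : List (String × Int)) (dict_in2 : List (String × Int)) : (List (String × Int)) × (List (String × Int)) × Int × Int :=
  let items1 := PySem.List.sorted2 (PySem.Dict.items ⟨dict_in1⟩) Prod.fst Prod.snd
  let items2 := PySem.List.sorted2 (PySem.Dict.items ⟨dict_in2⟩) Prod.fst Prod.snd
  -- fuel = the loop's maximal iteration count (each step consumes an index); a pure totality guard
  pvMergeLoop items1 items2 (items1.length + items2.length) 0 0 [] [] 0 0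

-- ===== PRECONDITION & SPEC =====
-- The inputs are Python dicts: Pre_ restricts the association lists to the dict convention's
-- valid representations (distinct keys); no actual Python input is excluded.
def pvNodup : List String → Bool
  | [] => true
  | x :: t => !t.contains x && pvNodup t

def Pre_keep_common_keys (dict_in1 : List (String × Int)) (dict_in2 : List (String × Int)) : Prop :=
  pvNodup (dict_in1.map Prod.fst) = true ∧ pvNodup (dict_in2.map Prod.fst) = true
instance (dict_in1 : List (String × Int)) (dict_in2 : List (String × Int)) : Decidable (Pre_keep_common_keys dict_in1 dict_in2) := by unfold Pre_keep_common_keys; infer_instance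

def pvWitness_keep_common_keys : (List (String × Int)) × (List (String × Int)) :=
  ([("a", 1), ("b", 2)], [("b", 3), ("c", 4)])

def Spec_keep_common_keys (dict_in1 : List (String × Int)) (dict_in2 : List (String × Int)) (out : (List (String × Int)) × (List (String × Int)) × Int × Int) : Prop := out = keep_common_keys_alt dict_in1 dict_in2
instance (dict_in1 : List (String × Int)) (dict_in2 : List (String × Int)) (out : (List (String × Int)) × (List (String × Int)) × Int × Int) : Decidable (Spec_keep_common_keys dict_in1 dict_in2 out) := by unfold Spec_keep_common_keys; infer_instance

-- ===== CLAIM (what is proved, stated in full; the proofs are below) =====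
def Claim_equal_keep_common_keys : Prop := ∀ (dict_in1 : List (String × Int)) (dict_in2 : List (String × Int)), Dom_keep_common_keys dict_in1 dict_in2 → Pre_keep_common_keys dict_in1 dict_in2 → Spec_keep_common_keys dict_in1 dict_in2 (keep_common_keys dict_in1 dict_in2)

-- ===== LEMMAS AND PROOFS =====

theorem pvNodup_iff (L : List String) : pvNodup L = true ↔ L.Nodup := by
  induction L with
  | nil => simp [pvNodup]
  | cons x t ih => simp [pvNodup, ih, List.nodup_cons]

theorem pv_getD_of_mem (l : List (String × Int)) (k : String) (v : Int)
    (hnd : (l.map Prod.fst).Nodup) (hm : (k, v) ∈ l) :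
    PySem.Dict.getD ⟨l⟩ k 0 = v := by
  induction l with
  | nil => cases hm
  | cons a t ih =>
    simp only [List.map_cons, List.nodup_cons] at hnd
    rcases List.mem_cons.mp hm with h | h
    · simp [PySem.Dict.getD, PySem.Dict.get?, ← h]
    · have hne : (a.1 == k) = false := by
        simp only [beq_eq_false_iff_ne, ne_eq]
        intro e
        exact hnd.1 (e ▸ (List.mem_map.mpr ⟨(k, v), h, rfl⟩))
      simpa [PySem.Dict.getD, PySem.Dict.get?, List.find?, hne] using ih hnd.2 h

theorem pv_foldl_insert_items (C : List String) (f : String → Int) (acc : PySem.Dict String Int)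
    (hnd : C.Nodup) (hfresh : ∀ k ∈ C, acc.contains k = false) :
    (C.foldl (fun a k => a.insert k (f k)) acc).items = acc.items ++ C.map (fun k => (k, f k)) := by
  induction C generalizing acc with
  | nil => simp
  | cons c t ih =>
    simp only [List.nodup_cons] at hnd
    have hc : acc.contains c = false := hfresh c (List.mem_cons_self ..)
    have hins : (acc.insert c (f c)).items = acc.items ++ [(c, f c)] := by
      simp [PySem.Dict.insert, hc]
    have hfresh' : ∀ k ∈ t, (acc.insert c (f c)).contains k = false := by
      intro k hk
      have hk1 : acc.contains k = false := hfresh k (List.mem_cons_of_mem _ hk)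
      have hkc : (c == k) = false := by
        simp only [beq_eq_false_iff_ne, ne_eq]; intro e; exact hnd.1 (e ▸ hk)
      simp [PySem.Dict.contains, hins] at *
      exact ⟨hk1, hkc⟩
    rw [List.foldl_cons, ih _ hnd.2 hfresh', hins]
    simp

theorem pv_foldl_sum_if (p : String → Bool) (f : String → Int) (l : List String) (s : Int) :
    l.foldl (fun s k => if ¬ p k then s + f k else s) s
      = s + ((l.filter (fun k => !p k)).map f).sum := by
  induction l generalizing s with
  | nil => simp
  | cons c t ih =>
    rw [List.foldl_cons]
    by_cases h : p c = true
    · rw [if_neg (by simp [h]), ih, List.filter_cons_of_neg (by simp [h])]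
    · rw [if_pos (by simp [h]), ih, List.filter_cons_of_pos (by simp [h]),
          List.map_cons, List.sum_cons]
      ring

theorem pv_insertBy_cons (before : α → α → Bool) (x y : α) (ys : List α) :
    PySem.List.insertBy before x (y :: ys)
      = if before x y then x :: y :: ys else y :: PySem.List.insertBy before x ys := rfl

theorem pv_insertBy_congr (before before' : α → α → Bool) (x : α) (l : List α)
    (h : ∀ y ∈ l, before x y = before' x y) :
    PySem.List.insertBy before x l = PySem.List.insertBy before' x l := by
  induction l with
  | nil => rfl
  | cons y ys ih =>
    rw [pv_insertBy_cons, pv_insertBy_cons, h y (List.mem_cons_self ..),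
        ih (fun z hz => h z (List.mem_cons_of_mem _ hz))]

theorem pv_insertBy_perm (before : α → α → Bool) (x : α) (l : List α) :
    (PySem.List.insertBy before x l).Perm (x :: l) := by
  induction l with
  | nil => exact List.Perm.refl _
  | cons y ys ih =>
    rw [pv_insertBy_cons]
    by_cases h : before x y
    · simp [h]
    · simp only [h, if_false, Bool.false_eq_true]
      exact (ih.cons y).trans (List.Perm.swap x y ys)

theorem pv_sorted2_aux (lt1 lt2 : (String × Int) → (String × Int) → Bool)
    (hlt : ∀ a b : String × Int, a.1 ≠ b.1 → lt2 a b = lt1 a b)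
    (xs acc : List (String × Int))
    (h : (xs.map Prod.fst ++ acc.map Prod.fst).Nodup) :
    xs.foldl (fun acc x => PySem.List.insertBy lt2 x acc) acc
      = xs.foldl (fun acc x => PySem.List.insertBy lt1 x acc) acc := by
  induction xs generalizing acc with
  | nil => rfl
  | cons x t ih =>
    have hx : ∀ y ∈ acc, x.1 ≠ y.1 := by
      intro y hy e
      simp only [List.map_cons, List.cons_append, List.nodup_cons] at h
      exact h.1 (List.mem_append.mpr (Or.inr (e ▸ List.mem_map.mpr ⟨y, hy, rfl⟩)))
    have hcong : PySem.List.insertBy lt2 x acc = PySem.List.insertBy lt1 x acc :=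
      pv_insertBy_congr _ _ _ _ (fun y hy => hlt x y (hx y hy))
    have hperm : ((t.map Prod.fst) ++ (PySem.List.insertBy lt1 x acc).map Prod.fst).Perm
        ((x :: t).map Prod.fst ++ acc.map Prod.fst) := by
      have h1 : ((PySem.List.insertBy lt1 x acc).map Prod.fst).Perm (x.1 :: acc.map Prod.fst) := by
        simpa using (pv_insertBy_perm lt1 x acc).map Prod.fst
      have h2 := (List.Perm.append_left (t.map Prod.fst) h1).trans
        (List.perm_middle (a := x.1) (l₁ := t.map Prod.fst) (l₂ := acc.map Prod.fst))
      simpa using h2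
    rw [List.foldl_cons, List.foldl_cons, hcong, ih _ (hperm.nodup_iff.mpr h)]

theorem pv_sorted2_eq_sorted (xs : List (String × Int)) (h : (xs.map Prod.fst).Nodup) :
    PySem.List.sorted2 xs Prod.fst Prod.snd false = PySem.List.sorted xs Prod.fst false := by
  unfold PySem.List.sorted2 PySem.List.sorted
  simp only [if_neg (by decide : ¬ (false = true))]
  apply pv_sorted2_aux
  · intro a b hne
    rcases lt_trichotomy a.1 b.1 with hlt | heq | hgt
    · simp [hlt]
    · exact absurd heq hne
    · simp [hgt, not_lt.mpr (le_of_lt hgt)]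
  · simpa using h

theorem pv_sorted2_pairwise_lt (xs : List (String × Int)) (h : (xs.map Prod.fst).Nodup) :
    (PySem.List.sorted2 xs Prod.fst Prod.snd false).Pairwise (fun a b => a.1 < b.1) := by
  rw [pv_sorted2_eq_sorted xs h]
  have hperm : (PySem.List.sorted xs Prod.fst false).Perm xs := PySem.List.sorted_perm xs Prod.fst false
  have hle : (PySem.List.sorted xs Prod.fst false).Pairwise (fun a b => a.1 ≤ b.1) :=
    PySem.List.sorted_pairwise xs Prod.fst
  have hne : (PySem.List.sorted xs Prod.fst false).Pairwise (fun a b => a.1 ≠ b.1) := by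
    have := (hperm.map Prod.fst).nodup_iff.mpr h
    exact List.pairwise_map.mp this
  exact (hle.and hne).imp (fun h => lt_of_le_of_ne h.1 h.2)

theorem pv_perm_map_filter (l : List (String × Int)) (C : List String)
    (hnd : (l.map Prod.fst).Nodup) (hC : C.Nodup) (hsub : ∀ k ∈ C, k ∈ l.map Prod.fst) :
    (C.map (fun k => (k, PySem.Dict.getD ⟨l⟩ k 0))).Perm
      (l.filter (fun kv => C.contains kv.1)) := by
  have hnd1 : (C.map (fun k => (k, PySem.Dict.getD ⟨l⟩ k 0))).Nodup := by
    apply List.Nodup.of_map Prod.fst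
    have he : (C.map (fun k => (k, PySem.Dict.getD ⟨l⟩ k 0))).map Prod.fst = C := by
      simp [List.map_map, Function.comp_def]
    rw [he]
    exact hC
  have hnd2 : (l.filter (fun kv => C.contains kv.1)).Nodup :=
    (List.Nodup.of_map Prod.fst hnd).filter _
  refine (List.perm_ext_iff_of_nodup hnd1 hnd2).mpr ?_
  intro kv
  constructor
  · intro h
    rcases List.mem_map.mp h with ⟨k, hkC, hkv⟩
    rcases List.mem_map.mp (hsub k hkC) with ⟨kw, hkw, hfst⟩
    have : PySem.Dict.getD ⟨l⟩ k 0 = kw.2 := pv_getD_of_mem l k kw.2 hnd (by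
      have : kw = (k, kw.2) := by rw [← hfst]
      exact this ▸ hkw)
    rw [List.mem_filter]
    constructor
    · rw [← hkv, this]
      have : kw = (k, kw.2) := by rw [← hfst]
      exact this ▸ hkw
    · rw [← hkv]
      exact List.elem_eq_true_of_mem hkC
  · intro h
    rcases List.mem_filter.mp h with ⟨hml, hc⟩
    have hkC : kv.1 ∈ C := by simpa using hc
    refine List.mem_map.mpr ⟨kv.1, hkC, ?_⟩
    have : PySem.Dict.getD ⟨l⟩ kv.1 0 = kv.2 := pv_getD_of_mem l kv.1 kv.2 hnd (by simpa using hml)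
    rw [this]

theorem pv_sum_eq (l : List (String × Int)) (C : List String)
    (hnd : (l.map Prod.fst).Nodup) :
    (((l.map Prod.fst).filter (fun k => !C.contains k)).map (fun k => PySem.Dict.getD ⟨l⟩ k 0)).sum
      = ((l.filter (fun kv => !C.contains kv.1)).map Prod.snd).sum := by
  have hfm : (l.map Prod.fst).filter (fun k => !C.contains k)
      = (l.filter (fun kv => !C.contains kv.1)).map Prod.fst := by
    simpa using (List.filter_map (f := (Prod.fst : String × Int → String))
      (p := fun k => !C.contains k) (l := l))
  rw [hfm, List.map_map]
  apply congrArg List.sum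
  apply List.map_congr_left
  intro kv hkv
  have hm : kv ∈ l := List.mem_of_mem_filter hkv
  exact pv_getD_of_mem l kv.1 kv.2 hnd (by simpa using hm)

theorem pv_tail_sum (l : List (String × Int)) (s : Int) :
    l.foldl (fun s kv => s + kv.2) s = s + (l.map Prod.snd).sum := by
  induction l generalizing s with
  | nil => simp
  | cons a t ih => rw [List.foldl_cons, ih, List.map_cons, List.sum_cons]; ring

-- the merge loop computes, on strictly key-sorted suffixes, the common pairs of each
-- side (in order) and the sums of values whose key is absent from the other side
theorem pvMergeLoop_spec (items1 items2 : List (String × Int)) (fuel i j : Nat)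
    (out1 out2 : List (String × Int)) (s1 s2 : Int)
    (hfu : items1.length - i + (items2.length - j) ≤ fuel)
    (h1 : (items1.drop i).Pairwise (fun a b => a.1 < b.1))
    (h2 : (items2.drop j).Pairwise (fun a b => a.1 < b.1)) :
    pvMergeLoop items1 items2 fuel i j out1 out2 s1 s2 =
      (out1 ++ (items1.drop i).filter (fun kv => ((items2.drop j).map Prod.fst).contains kv.1),
       out2 ++ (items2.drop j).filter (fun kv => ((items1.drop i).map Prod.fst).contains kv.1),
       s1 + (((items1.drop i).filter (fun kv => !((items2.drop j).map Prod.fst).contains kv.1)).map Prod.snd).sum,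
       s2 + (((items2.drop j).filter (fun kv => !((items1.drop i).map Prod.fst).contains kv.1)).map Prod.snd).sum) := by
  induction fuel generalizing i j out1 out2 s1 s2 with
  | zero =>
    have hi : items1.length ≤ i := by omega
    have hj : items2.length ≤ j := by omega
    rw [List.drop_eq_nil_of_le hi, List.drop_eq_nil_of_le hj] at *
    simp [pvMergeLoop, List.drop_eq_nil_of_le, hi, hj]
  | succ fuel ih =>
  by_cases h : i < items1.length ∧ j < items2.length
  · rw [show pvMergeLoop items1 items2 (fuel+1) i j out1 out2 s1 s2
        = if h : i < items1.length ∧ j < items2.length then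
            if (items1[i]'h.1).1 == (items2[j]'h.2).1 then
              pvMergeLoop items1 items2 fuel (i+1) (j+1) (out1 ++ [items1[i]'h.1]) (out2 ++ [items2[j]'h.2]) s1 s2
            else if (items1[i]'h.1).1 < (items2[j]'h.2).1 then
              pvMergeLoop items1 items2 fuel (i+1) j out1 out2 (s1 + (items1[i]'h.1).2) s2
            else
              pvMergeLoop items1 items2 fuel i (j+1) out1 out2 s1 (s2 + (items2[j]'h.2).2)
          else
            (out1, out2,
             (items1.drop i).foldl (fun s kv => s + kv.2) s1,
             (items2.drop j).foldl (fun s kv => s + kv.2) s2) from rfl]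
    rw [dif_pos h]
    have hd1 : items1.drop i = items1[i]'h.1 :: items1.drop (i+1) := List.drop_eq_getElem_cons h.1
    have hd2 : items2.drop j = items2[j]'h.2 :: items2.drop (j+1) := List.drop_eq_getElem_cons h.2
    set kv1 := items1[i]'h.1 with hkv1
    set kv2 := items2[j]'h.2 with hkv2
    have ht1 : (items1.drop (i+1)).Pairwise (fun a b => a.1 < b.1) := by
      rw [hd1] at h1; exact h1.tail
    have ht2 : (items2.drop (j+1)).Pairwise (fun a b => a.1 < b.1) := by
      rw [hd2] at h2; exact h2.tail
    have hl1 : ∀ kv ∈ items1.drop (i+1), kv1.1 < kv.1 := by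
      rw [hd1] at h1; exact fun kv hm => (List.pairwise_cons.mp h1).1 kv hm
    have hl2 : ∀ kv ∈ items2.drop (j+1), kv2.1 < kv.1 := by
      rw [hd2] at h2; exact fun kv hm => (List.pairwise_cons.mp h2).1 kv hm
    by_cases heq : kv1.1 == kv2.1
    · rw [if_pos heq]
      have he : kv1.1 = kv2.1 := by simpa using heq
      rw [ih (i+1) (j+1) _ _ _ _ (by omega) ht1 ht2, hd1, hd2]
      have f1 : (kv1 :: items1.drop (i+1)).filter
          (fun kv => ((kv2 :: items2.drop (j+1)).map Prod.fst).contains kv.1)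
          = kv1 :: (items1.drop (i+1)).filter
              (fun kv => ((items2.drop (j+1)).map Prod.fst).contains kv.1) := by
        rw [List.filter_cons_of_pos (by simp [he])]
        congr 1
        apply List.filter_congr
        intro kv hm
        have : kv2.1 ≠ kv.1 := fun e => absurd (e ▸ (he ▸ hl1 kv hm)) (lt_irrefl _)
        simp [List.contains_cons, beq_eq_false_iff_ne, Ne.symm this]
      have f2 : (kv2 :: items2.drop (j+1)).filter
          (fun kv => ((kv1 :: items1.drop (i+1)).map Prod.fst).contains kv.1)
          = kv2 :: (items2.drop (j+1)).filter
              (fun kv => ((items1.drop (i+1)).map Prod.fst).contains kv.1) := by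
        rw [List.filter_cons_of_pos (by simp [he])]
        congr 1
        apply List.filter_congr
        intro kv hm
        have : kv1.1 ≠ kv.1 := fun e => absurd (e ▸ (he ▸ hl2 kv hm)) (lt_irrefl _)
        simp [List.contains_cons, beq_eq_false_iff_ne, Ne.symm this]
      have g1 : (kv1 :: items1.drop (i+1)).filter
          (fun kv => !((kv2 :: items2.drop (j+1)).map Prod.fst).contains kv.1)
          = (items1.drop (i+1)).filter
              (fun kv => !((items2.drop (j+1)).map Prod.fst).contains kv.1) := by
        rw [List.filter_cons_of_neg (by simp [he])]
        apply List.filter_congr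
        intro kv hm
        have : kv2.1 ≠ kv.1 := fun e => absurd (e ▸ (he ▸ hl1 kv hm)) (lt_irrefl _)
        simp [List.contains_cons, beq_eq_false_iff_ne, Ne.symm this]
      have g2 : (kv2 :: items2.drop (j+1)).filter
          (fun kv => !((kv1 :: items1.drop (i+1)).map Prod.fst).contains kv.1)
          = (items2.drop (j+1)).filter
              (fun kv => !((items1.drop (i+1)).map Prod.fst).contains kv.1) := by
        rw [List.filter_cons_of_neg (by simp [he])]
        apply List.filter_congr
        intro kv hm
        have : kv1.1 ≠ kv.1 := fun e => absurd (e ▸ (he ▸ hl2 kv hm)) (lt_irrefl _)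
        simp [List.contains_cons, beq_eq_false_iff_ne, Ne.symm this]
      rw [f1, f2, g1, g2]
      simp
    · rw [if_neg (by simpa using heq)]
      have hne : kv1.1 ≠ kv2.1 := by simpa using heq
      by_cases hlt : kv1.1 < kv2.1
      · rw [if_pos (by simpa using hlt)]
        rw [ih (i+1) j _ _ _ _ (by omega) ht1 h2, hd1]
        have hnotin : ∀ kv ∈ items2.drop j, kv1.1 ≠ kv.1 := by
          intro kv hm
          rw [hd2] at hm
          rcases List.mem_cons.mp hm with e | hm'
          · exact e ▸ hne
          · exact fun e => absurd (e ▸ (hlt.trans (hl2 kv hm'))) (lt_irrefl _)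
        have f1 : (kv1 :: items1.drop (i+1)).filter
            (fun kv => ((items2.drop j).map Prod.fst).contains kv.1)
            = (items1.drop (i+1)).filter
                (fun kv => ((items2.drop j).map Prod.fst).contains kv.1) := by
          rw [List.filter_cons_of_neg]
          simp only [List.contains_eq_mem, List.mem_map, decide_eq_true_eq]
          rintro ⟨kv, hm, e⟩
          exact hnotin kv hm e.symm
        have g1 : (kv1 :: items1.drop (i+1)).filter
            (fun kv => !((items2.drop j).map Prod.fst).contains kv.1)
            = kv1 :: (items1.drop (i+1)).filter
                (fun kv => !((items2.drop j).map Prod.fst).contains kv.1) := by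
          rw [List.filter_cons_of_pos]
          simp only [List.contains_eq_mem, List.mem_map, Bool.not_eq_eq_eq_not, Bool.not_true,
            decide_eq_false_iff_not]
          rintro ⟨kv, hm, e⟩
          exact hnotin kv hm e.symm
        have f2 : (items2.drop j).filter
            (fun kv => ((kv1 :: items1.drop (i+1)).map Prod.fst).contains kv.1)
            = (items2.drop j).filter
                (fun kv => ((items1.drop (i+1)).map Prod.fst).contains kv.1) := by
          apply List.filter_congr
          intro kv hm
          simp [List.contains_cons, beq_eq_false_iff_ne, Ne.symm (hnotin kv hm)]
        have g2 : (items2.drop j).filter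
            (fun kv => !((kv1 :: items1.drop (i+1)).map Prod.fst).contains kv.1)
            = (items2.drop j).filter
                (fun kv => !((items1.drop (i+1)).map Prod.fst).contains kv.1) := by
          apply List.filter_congr
          intro kv hm
          simp [List.contains_cons, beq_eq_false_iff_ne, Ne.symm (hnotin kv hm)]
        rw [f1, f2, g1, g2]
        simp only [List.map_cons, List.sum_cons, Prod.mk.injEq, and_true, true_and]
        ring
      · rw [if_neg (by simpa using hlt)]
        have hgt : kv2.1 < kv1.1 := lt_of_le_of_ne (not_lt.mp hlt) (Ne.symm hne)
        rw [ih i (j+1) _ _ _ _ (by omega) h1 ht2, hd2]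
        have hnotin : ∀ kv ∈ items1.drop i, kv2.1 ≠ kv.1 := by
          intro kv hm
          rw [hd1] at hm
          rcases List.mem_cons.mp hm with e | hm'
          · exact e ▸ (Ne.symm hne)
          · exact fun e => absurd (e ▸ (hgt.trans (hl1 kv hm'))) (lt_irrefl _)
        have f2 : (kv2 :: items2.drop (j+1)).filter
            (fun kv => ((items1.drop i).map Prod.fst).contains kv.1)
            = (items2.drop (j+1)).filter
                (fun kv => ((items1.drop i).map Prod.fst).contains kv.1) := by
          rw [List.filter_cons_of_neg]
          simp only [List.contains_eq_mem, List.mem_map, decide_eq_true_eq]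
          rintro ⟨kv, hm, e⟩
          exact hnotin kv hm e.symm
        have g2 : (kv2 :: items2.drop (j+1)).filter
            (fun kv => !((items1.drop i).map Prod.fst).contains kv.1)
            = kv2 :: (items2.drop (j+1)).filter
                (fun kv => !((items1.drop i).map Prod.fst).contains kv.1) := by
          rw [List.filter_cons_of_pos]
          simp only [List.contains_eq_mem, List.mem_map, Bool.not_eq_eq_eq_not, Bool.not_true,
            decide_eq_false_iff_not]
          rintro ⟨kv, hm, e⟩
          exact hnotin kv hm e.symm
        have f1 : (items1.drop i).filter
            (fun kv => ((kv2 :: items2.drop (j+1)).map Prod.fst).contains kv.1)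
            = (items1.drop i).filter
                (fun kv => ((items2.drop (j+1)).map Prod.fst).contains kv.1) := by
          apply List.filter_congr
          intro kv hm
          simp [List.contains_cons, beq_eq_false_iff_ne, Ne.symm (hnotin kv hm)]
        have g1 : (items1.drop i).filter
            (fun kv => !((kv2 :: items2.drop (j+1)).map Prod.fst).contains kv.1)
            = (items1.drop i).filter
                (fun kv => !((items2.drop (j+1)).map Prod.fst).contains kv.1) := by
          apply List.filter_congr
          intro kv hm
          simp [List.contains_cons, beq_eq_false_iff_ne, Ne.symm (hnotin kv hm)]
        rw [f1, f2, g1, g2]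
        simp only [List.map_cons, List.sum_cons, Prod.mk.injEq, and_true, true_and]
        ring
  · rw [show pvMergeLoop items1 items2 (fuel+1) i j out1 out2 s1 s2
        = if h : i < items1.length ∧ j < items2.length then
            if (items1[i]'h.1).1 == (items2[j]'h.2).1 then
              pvMergeLoop items1 items2 fuel (i+1) (j+1) (out1 ++ [items1[i]'h.1]) (out2 ++ [items2[j]'h.2]) s1 s2
            else if (items1[i]'h.1).1 < (items2[j]'h.2).1 then
              pvMergeLoop items1 items2 fuel (i+1) j out1 out2 (s1 + (items1[i]'h.1).2) s2
            else
              pvMergeLoop items1 items2 fuel i (j+1) out1 out2 s1 (s2 + (items2[j]'h.2).2)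
          else
            (out1, out2,
             (items1.drop i).foldl (fun s kv => s + kv.2) s1,
             (items2.drop j).foldl (fun s kv => s + kv.2) s2) from rfl]
    rw [dif_neg h]
    have hemp : items1.drop i = [] ∨ items2.drop j = [] := by
      rcases not_and_or.mp h with h' | h'
      · exact Or.inl (List.drop_eq_nil_of_le (by omega))
      · exact Or.inr (List.drop_eq_nil_of_le (by omega))
    rcases hemp with he | he
    · rw [he]
      simp [pv_tail_sum]
    · rw [he]
      simp [pv_tail_sum]

-- ===== VERDICT (by name: the statement is the Claim_ definition above) =====
theorem keep_common_keys_spec : Claim_equal_keep_common_keys := by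
  intro d1 d2 _ hpre
  obtain ⟨h1', h2'⟩ := hpre
  have h1 := (pvNodup_iff _).mp h1'
  have h2 := (pvNodup_iff _).mp h2'
  unfold Spec_keep_common_keys keep_common_keys keep_common_keys_alt
  dsimp only
  have hk1 : PySem.Dict.keys (⟨d1⟩ : PySem.Dict String Int) = d1.map Prod.fst := rfl
  have hk2 : PySem.Dict.keys (⟨d2⟩ : PySem.Dict String Int) = d2.map Prod.fst := rfl
  rw [hk1, hk2, PySem.Set.ofList_eq_self_of_nodup _ h1]
  set C : List String := (d1.map Prod.fst).filter (fun k => PySem.Dict.contains ⟨d2⟩ k) with hCdef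
  have hndC : C.Nodup := h1.filter _
  have hsub1 : ∀ k ∈ C, k ∈ d1.map Prod.fst := fun k hk => List.mem_of_mem_filter hk
  have hsub2 : ∀ k ∈ C, k ∈ d2.map Prod.fst := by
    intro k hk
    have := (List.mem_filter.mp hk).2
    simpa [PySem.Dict.contains, List.any_eq_true, List.mem_map] using this
  -- set B-side names
  set S1 := PySem.List.sorted2 d1 Prod.fst Prod.snd with hS1
  set S2 := PySem.List.sorted2 d2 Prod.fst Prod.snd with hS2
  have hP1 : S1.Perm d1 := by rw [hS1]; exact PySem.List.sorted2_perm ..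
  have hP2 : S2.Perm d2 := by rw [hS2]; exact PySem.List.sorted2_perm ..
  have hndS1 : (S1.map Prod.fst).Nodup := ((hP1.map Prod.fst).nodup_iff).mpr h1
  have hndS2 : (S2.map Prod.fst).Nodup := ((hP2.map Prod.fst).nodup_iff).mpr h2
  have hlt1 : S1.Pairwise (fun a b => a.1 < b.1) := pv_sorted2_pairwise_lt d1 h1
  have hlt2 : S2.Pairwise (fun a b => a.1 < b.1) := pv_sorted2_pairwise_lt d2 h2
  rw [pvMergeLoop_spec S1 S2 (S1.length + S2.length) 0 0 [] [] 0 0 (by omega)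
        (by simpa using hlt1) (by simpa using hlt2)]
  simp only [List.drop_zero, List.nil_append, zero_add]
  -- membership in the other side's sorted keys ≡ membership in C (for elements of each dict)
  have hCmem1 : ∀ kv : String × Int, kv ∈ d1 →
      ((S2.map Prod.fst).contains kv.1) = C.contains kv.1 := by
    intro kv hm
    have hiff : kv.1 ∈ S2.map Prod.fst ↔ kv.1 ∈ C := by
      rw [List.Perm.mem_iff (hP2.map Prod.fst)]
      constructor
      · intro hk
        refine List.mem_filter.mpr ⟨List.mem_map.mpr ⟨kv, hm, rfl⟩, ?_⟩
        simpa [PySem.Dict.contains, List.any_eq_true, List.mem_map] using hk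
      · intro hk
        have := (List.mem_filter.mp hk).2
        simpa [PySem.Dict.contains, List.any_eq_true, List.mem_map] using this
    simp only [List.contains_eq_mem, decide_eq_decide]
    exact hiff
  have hCmem2 : ∀ kv : String × Int, kv ∈ d2 →
      ((S1.map Prod.fst).contains kv.1) = C.contains kv.1 := by
    intro kv hm
    have hiff : kv.1 ∈ S1.map Prod.fst ↔ kv.1 ∈ C := by
      rw [List.Perm.mem_iff (hP1.map Prod.fst)]
      constructor
      · intro hk
        rcases List.mem_map.mp hk with ⟨kw, hkw, hfst⟩
        refine List.mem_filter.mpr ⟨hfst ▸ List.mem_map.mpr ⟨kw, hkw, rfl⟩, ?_⟩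
        simp only [decide_eq_true_eq, PySem.Dict.contains, List.any_eq_true]
        exact ⟨kv, hm, by simp⟩
      · intro hk
        exact hsub1 kv.1 hk
    simp only [List.contains_eq_mem, decide_eq_decide]
    exact hiff
  -- B filters over sorted lists equal filters by C (pointwise on members)
  have hBf1 : S1.filter (fun kv => (S2.map Prod.fst).contains kv.1)
      = S1.filter (fun kv => C.contains kv.1) :=
    List.filter_congr (fun kv hm => hCmem1 kv (hP1.mem_iff.mp hm))
  have hBf2 : S2.filter (fun kv => (S1.map Prod.fst).contains kv.1)
      = S2.filter (fun kv => C.contains kv.1) :=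
    List.filter_congr (fun kv hm => hCmem2 kv (hP2.mem_iff.mp hm))
  have hBg1 : S1.filter (fun kv => !(S2.map Prod.fst).contains kv.1)
      = S1.filter (fun kv => !C.contains kv.1) :=
    List.filter_congr (fun kv hm => by rw [hCmem1 kv (hP1.mem_iff.mp hm)])
  have hBg2 : S2.filter (fun kv => !(S1.map Prod.fst).contains kv.1)
      = S2.filter (fun kv => !C.contains kv.1) :=
    List.filter_congr (fun kv hm => by rw [hCmem2 kv (hP2.mem_iff.mp hm)])
  rw [pv_foldl_insert_items C _ ⟨[]⟩ hndC (fun _ _ => rfl),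
      pv_foldl_insert_items C _ ⟨[]⟩ hndC (fun _ _ => rfl),
      pv_foldl_sum_if (fun k => C.contains k) _ _ 0,
      pv_foldl_sum_if (fun k => C.contains k) _ _ 0]
  simp only [List.nil_append, zero_add, Prod.mk.injEq]
  refine ⟨?_, ?_, ?_, ?_⟩
  · -- sorted common items of dict 1
    rw [hBf1, pv_sorted2_eq_sorted _ (by simp [List.map_map, Function.comp_def, hndC])]
    apply PySem.List.sorted_eq_of_perm_of_pairwise_lt
    · exact (hP1.filter _).trans (pv_perm_map_filter d1 C h1 hndC hsub1).symm
    · exact hlt1.sublist List.filter_sublist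
  · rw [hBf2, pv_sorted2_eq_sorted _ (by simp [List.map_map, Function.comp_def, hndC])]
    apply PySem.List.sorted_eq_of_perm_of_pairwise_lt
    · exact (hP2.filter _).trans (pv_perm_map_filter d2 C h2 hndC hsub2).symm
    · exact hlt2.sublist List.filter_sublist
  · rw [pv_sum_eq d1 C h1, hBg1]
    exact (((hP1.filter _).map Prod.snd).sum_eq).symm
  · rw [pv_sum_eq d2 C h2, hBg2]
    exact ((((hP2.filter _).map Prod.snd).sum_eq).symm)
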